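-- pv_equiv track=rewrite | github.com/mrstevenaweiss/algorithms | Python/unique_add.py | solution
-- ===== SOURCE A (Python) =====
-- import math
--
-- def solution(N):
--     l = [None] * N
--     if len(l) % 2 == 1:
--         num = math.ceil( len(l)/2 )
--         mid_point = num-1
--         l[mid_point] = 0
--
--         subtractor = -1
--         for i in reversed(range(mid_point)):
--             l[i] = subtractor
--             subtractor = subtractor-1
--
--         adder = 1
--         for x in range(mid_point+1, len(l)):
--             l[x] = adder
--             adder = adder+1
--
--     else:
--         num = math.ceil( len(l)/2 )
--         even_mid_point = num
--
--         subtractor = -1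
--         for i in reversed(range(even_mid_point)):
--             l[i] = subtractor
--             subtractor = subtractor-1
--
--         adder = 1
--         for x in range(even_mid_point, len(l)):
--             l[x] = adder
--             adder = adder+1
--
--     return l
--     pass
-- ===== SOURCE B (Python) =====
-- def solution(N):
--     if N % 2 == 1:
--         mid = (N - 1) // 2
--         return [i - mid for i in range(N)]
--     half = N // 2
--     return [i - half if i < half else i - half + 1 for i in range(N)]
-- ===== Notes on version B (the rewrite author's own statement) =====
-- stated objective: simpler
-- what changed: Replaces A's placeholder list with two running-accumulator fill loops and a center-zero assignment by a single closed-form index-to-value formula over range(N).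
import Mathlib
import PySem

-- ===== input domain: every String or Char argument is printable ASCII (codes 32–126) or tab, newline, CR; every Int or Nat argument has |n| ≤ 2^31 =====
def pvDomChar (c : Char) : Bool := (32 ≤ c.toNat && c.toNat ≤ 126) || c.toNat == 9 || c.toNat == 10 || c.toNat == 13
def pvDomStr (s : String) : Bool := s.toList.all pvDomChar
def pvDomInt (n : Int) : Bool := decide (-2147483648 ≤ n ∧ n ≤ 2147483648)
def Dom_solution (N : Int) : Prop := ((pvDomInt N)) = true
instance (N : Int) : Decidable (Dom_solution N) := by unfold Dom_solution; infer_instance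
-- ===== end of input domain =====

-- B replaces A's two running-accumulator fill loops and center-zero assignment by a
-- closed-form index-to-value formula over range(N); objective: simpler (same O(N) cost).


-- ===== PORT A =====
-- l = [None]*N is a list of Options; each loop is a foldl over the same (list, accumulator)
-- state, setting one slot per iteration.  math.ceil(len/2) on an int len is (len+1)//2 exactly.
-- The final `.map (·.getD 0)` only extracts the Option values: in every branch every slot of
-- the returned list has been written (for N ≤ 0 the list is empty), so None never survives.
def solution (N : Int) : List Int :=
  let l0 : List (Option Int) := List.replicate N.toNat none   -- [None] * N ([] for N ≤ 0)
  let len : Int := (l0.length : Int)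
  if PySem.Int.mod len 2 == 1 then
    let num : Int := PySem.Int.floordiv (len + 1) 2           -- math.ceil(len/2)
    let midPoint : Int := num - 1
    let l1 := l0.set midPoint.toNat (some 0)                  -- l[mid_point] = 0
    let st1 := ((PySem.List.pyRange 0 midPoint 1).reverse).foldl
      (fun st i => (st.1.set i.toNat (some st.2), st.2 - 1)) (l1, (-1 : Int))
    let st2 := (PySem.List.pyRange (midPoint + 1) len 1).foldl
      (fun st x => (st.1.set x.toNat (some st.2), st.2 + 1)) (st1.1, (1 : Int))
    st2.1.map (fun o => o.getD 0)
  else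
    let num : Int := PySem.Int.floordiv (len + 1) 2           -- math.ceil(len/2)
    let evenMidPoint : Int := num
    let st1 := ((PySem.List.pyRange 0 evenMidPoint 1).reverse).foldl
      (fun st i => (st.1.set i.toNat (some st.2), st.2 - 1)) (l0, (-1 : Int))
    let st2 := (PySem.List.pyRange evenMidPoint len 1).foldl
      (fun st x => (st.1.set x.toNat (some st.2), st.2 + 1)) (st1.1, (1 : Int))
    st2.1.map (fun o => o.getD 0)

-- ===== PORT B =====
def solution_alt (N : Int) : List Int :=
  if PySem.Int.mod N 2 == 1 then
    let mid : Int := PySem.Int.floordiv (N - 1) 2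
    (PySem.List.pyRange 0 N 1).map (fun i => i - mid)
  else
    let half : Int := PySem.Int.floordiv N 2
    (PySem.List.pyRange 0 N 1).map (fun i => if i < half then i - half else i - half + 1)

-- ===== PRECONDITION & SPEC =====
def Spec_solution (N : Int) (out : List Int) : Prop := out = solution_alt N
instance (N : Int) (out : List Int) : Decidable (Spec_solution N out) := by unfold Spec_solution; infer_instance

-- ===== CLAIM (what is proved, stated in full; the proofs are below) =====
def Claim_equal_solution : Prop := ∀ (N : Int), Dom_solution N → Spec_solution N (solution N)

-- ===== LEMMAS AND PROOFS =====

theorem drop_set_self {α : Type} (l : List α) (m : Nat) (x : α) (h : m < l.length) :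
    (l.set m x).drop m = x :: l.drop (m+1) := by
  apply List.ext_getElem
  · simp; omega
  · intro i h1 h2
    rcases Nat.eq_zero_or_pos i with h0 | h0
    · subst h0; simp [List.getElem_drop]
    · simp [List.getElem_drop, List.getElem_set]
      rw [List.getElem_cons]
      split
      · omega
      · simp [List.getElem_drop]; congr 1; omega

theorem take_set_self {α : Type} (l : List α) (m : Nat) (x : α) (h : m < l.length) :
    (l.set m x).take (m+1) = l.take m ++ [x] := by
  apply List.ext_getElem
  · simp; omega
  · intro i h1 h2
    simp at h1
    rcases Nat.lt_or_ge i m with hi | hi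
    · rw [List.getElem_take, List.getElem_set]
      rw [List.getElem_append_left (by simp; omega)]
      simp [List.getElem_take, Nat.ne_of_gt hi]
    · have him : i = m := by simp at h2; omega
      subst him
      rw [List.getElem_take, List.getElem_set]
      rw [List.getElem_append_right (by simp)]
      simp

-- the reversed subtractor loop: fills slots m-1, …, 0 with -1, -2, …, -m
theorem down_fold (m : Nat) (l : List (Option Int)) (s : Int) (h : m ≤ l.length) :
    (((PySem.List.pyRange 0 (m:Int) 1).reverse).foldl
        (fun st i => (st.1.set i.toNat (some st.2), st.2 - 1)) (l, s)).1
      = (List.range m).map (fun j : Nat => some (s + (j:Int) - (m:Int) + 1)) ++ l.drop m := by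
  induction m generalizing l s with
  | zero => simp [PySem.List.pyRange_one_eq_nil (le_refl (0:Int))]
  | succ m ih =>
    have hr : PySem.List.pyRange 0 ((m:Int)+1) 1
        = PySem.List.pyRange 0 (m:Int) 1 ++ [(m:Int)] :=
      PySem.List.pyRange_one_succ_right (by positivity)
    have hcast : ((m+1 : Nat) : Int) = (m:Int) + 1 := by push_cast; ring
    rw [hcast, hr, List.reverse_append]
    simp only [List.reverse_singleton, List.singleton_append, List.foldl_cons]
    have hm : ((m:Int)).toNat = m := by simp
    rw [hm, ih (l.set m (some s)) (s - 1) (by simp; omega)]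
    rw [drop_set_self l m (some s) (by omega)]
    rw [List.range_succ]
    simp only [List.map_append, List.map_cons, List.map_nil, List.append_assoc]
    congr 1
    · apply List.map_congr_left; intro j hj; congr 1; ring
    · simp only [List.singleton_append, List.cons.injEq]
      exact ⟨by congr 1; ring, trivial⟩

-- the adder loop: fills slots a, a+1, …, a+k-1 with c, c+1, …, c+k-1
theorem up_fold (k : Nat) (a : Int) (l : List (Option Int)) (c : Int)
    (ha : 0 ≤ a) (h : a.toNat + k = l.length) :
    ((PySem.List.pyRange a (a + (k:Int)) 1).foldl
        (fun st x => (st.1.set x.toNat (some st.2), st.2 + 1)) (l, c)).1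
      = l.take a.toNat ++ (List.range k).map (fun j : Nat => some (c + (j:Int))) := by
  induction k generalizing a l c with
  | zero =>
    simp only [Nat.cast_zero, add_zero, List.range_zero, List.map_nil, List.append_nil]
    rw [PySem.List.pyRange_one_eq_nil (le_refl a)]
    simp only [List.foldl_nil]
    exact (List.take_of_length_le (by omega)).symm
  | succ k ih =>
    have hcast : ((k+1 : Nat) : Int) = (k:Int) + 1 := by push_cast; ring
    have hr : PySem.List.pyRange a (a + ((k:Int)+1)) 1
        = a :: PySem.List.pyRange (a+1) (a + ((k:Int)+1)) 1 :=
      PySem.List.pyRange_one_cons (by omega)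
    rw [hcast, hr, List.foldl_cons]
    have harr : a + ((k:Int)+1) = (a+1) + (k:Int) := by ring
    rw [harr]
    have h1 : (a+1).toNat = a.toNat + 1 := by omega
    rw [ih (a+1) (l.set a.toNat (some c)) (c+1) (by omega) (by simp [h1]; omega)]
    rw [h1, take_set_self l a.toNat (some c) (by omega)]
    simp only [List.range_succ_eq_map, List.map_cons, List.map_map, Nat.cast_zero, add_zero,
      List.append_assoc, List.singleton_append]
    congr 1
    congr 1
    apply List.map_congr_left
    intro j hj
    simp only [Function.comp_apply, Option.some.injEq]
    push_cast; ring

-- range-splitting identities aligning B's single comprehension with A's pieces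
theorem range_split_odd {α : Type} (k : Nat) (f : Nat → α) :
    (List.range (2*k+1)).map f
      = ((List.range k).map f ++ [f k]) ++ (List.range k).map (fun j => f (k+1+j)) := by
  have h : 2*k+1 = (k+1) + k := by omega
  rw [h, List.range_add, List.range_succ]
  simp [List.map_map, Function.comp_def]

theorem range_split_even {α : Type} (k : Nat) (f : Nat → α) :
    (List.range (2*k)).map f
      = (List.range k).map f ++ (List.range k).map (fun j => f (k+j)) := by
  have h : 2*k = k + k := by omega
  rw [h, List.range_add]
  simp [List.map_map, Function.comp_def]

-- B's comprehension over pyRange 0 N 1 as a map over List.range N.toNat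
theorem pyRange_map (N : Int) (g : Int → Int) :
    (PySem.List.pyRange 0 N 1).map g = (List.range N.toNat).map (fun j : Nat => g (j:Int)) := by
  rw [PySem.List.pyRange_one]
  simp [List.map_map, Function.comp_def]

-- A's odd branch, evaluated: three explicit pieces
theorem solution_pos_odd (k : Nat) :
    solution (2*(k:Int)+1)
      = (List.range k).map (fun j : Nat => ((-1) + (j:Int) - (k:Int) + 1))
          ++ [(0:Int)] ++ (List.range k).map (fun j : Nat => 1 + (j:Int)) := by
  have hNt : (2*(k:Int)+1).toNat = 2*k+1 := by omega
  have hc : ((2*k+1 : Nat) : Int) = 2*(k:Int)+1 := by push_cast; ring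
  have hmod : PySem.Int.mod (2*(k:Int)+1) 2 = 1 := by
    rw [PySem.Int.mod_eq_emod_of_pos (by norm_num)]; omega
  have hnum : PySem.Int.floordiv (2*(k:Int)+1+1) 2 = (k:Int)+1 := by
    rw [PySem.Int.floordiv_eq_ediv_of_pos (by norm_num)]; omega
  simp only [solution, List.length_replicate, hNt, hc, hmod, hnum]
  rw [if_pos (by decide : (((1:Int) == 1) = true))]
  have hmp : (k:Int)+1-1 = (k:Int) := by ring
  rw [hmp]
  rw [down_fold k _ (-1) (by simp; omega)]
  rw [Int.toNat_natCast, drop_set_self _ k _ (by simp; omega)]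
  rw [List.drop_replicate]
  have hrep : 2*k+1 - (k+1) = k := by omega
  rw [hrep]
  have hsplit : 2*(k:Int)+1 = ((k:Int)+1) + (k:Int) := by ring
  rw [hsplit, up_fold k ((k:Int)+1) _ 1 (by positivity) (by simp; omega)]
  have ht1 : ((k:Int)+1).toNat = k+1 := by omega
  rw [ht1, List.take_append]
  rw [List.take_of_length_le (by simp)]
  have ht2 : k+1 - ((List.range k).map (fun j : Nat => some ((-1) + (j:Int) - (k:Int) + 1))).length = 1 := by
    simp
  rw [ht2]
  simp [List.map_map, Function.comp_def]

-- A's even branch, evaluated: two explicit pieces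
theorem solution_pos_even (k : Nat) :
    solution (2*(k:Int))
      = (List.range k).map (fun j : Nat => ((-1) + (j:Int) - (k:Int) + 1))
          ++ (List.range k).map (fun j : Nat => 1 + (j:Int)) := by
  have hNt : (2*(k:Int)).toNat = 2*k := by omega
  have hc : ((2*k : Nat) : Int) = 2*(k:Int) := by push_cast; ring
  have hmod : PySem.Int.mod (2*(k:Int)) 2 = 0 := by
    rw [PySem.Int.mod_eq_emod_of_pos (by norm_num)]; omega
  have hnum : PySem.Int.floordiv (2*(k:Int)+1) 2 = (k:Int) := by
    rw [PySem.Int.floordiv_eq_ediv_of_pos (by norm_num)]; omega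
  simp only [solution, List.length_replicate, hNt, hc, hmod, hnum]
  rw [if_neg (by decide : ¬(((0:Int) == 1) = true))]
  rw [down_fold k _ (-1) (by simp; omega)]
  rw [List.drop_replicate]
  have hrep : 2*k - k = k := by omega
  rw [hrep]
  have hsplit : 2*(k:Int) = (k:Int) + (k:Int) := by ring
  rw [hsplit, up_fold k (k:Int) _ 1 (by positivity) (by simp)]
  rw [Int.toNat_natCast, List.take_append]
  rw [List.take_of_length_le (by simp)]
  have ht2 : k - ((List.range k).map (fun j : Nat => some ((-1) + (j:Int) - (k:Int) + 1))).length = 0 := by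
    simp
  rw [ht2]
  simp [List.map_map, Function.comp_def]

theorem solution_spec' : ∀ (N : Int), solution N = solution_alt N := by
  intro N
  rcases le_or_gt N 0 with hN | hN
  · -- N ≤ 0: both sides are []
    have h0 : N.toNat = 0 := by omega
    simp [solution, solution_alt, h0, PySem.Int.mod, PySem.Int.floordiv,
      PySem.List.pyRange_one_eq_nil (by omega : N ≤ (0:Int)),
      PySem.List.pyRange_one_eq_nil (le_refl (0:Int))]
  · rcases Nat.even_or_odd N.toNat with ⟨k, hk⟩ | ⟨k, hk⟩
    · -- N = 2k (even, positive)
      have hNk : N = 2*(k:Int) := by omega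
      have hmod : PySem.Int.mod N 2 = 0 := by
        rw [PySem.Int.mod_eq_emod_of_pos (by norm_num)]; omega
      have hhalf : PySem.Int.floordiv N 2 = (k:Int) := by
        rw [PySem.Int.floordiv_eq_ediv_of_pos (by norm_num)]; omega
      rw [hNk] at hmod hhalf ⊢
      rw [solution_pos_even k]
      simp only [solution_alt, hmod, hhalf]
      rw [if_neg (by decide : ¬(((0:Int) == 1) = true))]
      rw [pyRange_map]
      have ht : (2*(k:Int)).toNat = 2*k := by omega
      rw [ht, range_split_even k (fun j : Nat => if ((j:Int)) < (k:Int) then (j:Int) - (k:Int) else (j:Int) - (k:Int) + 1)]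
      congr 1
      · apply List.map_congr_left
        intro j hj
        simp only [List.mem_range] at hj
        rw [if_pos (by exact_mod_cast hj)]
        ring
      · apply List.map_congr_left
        intro j hj
        rw [if_neg (by push_cast; omega)]
        push_cast; ring
    · -- N = 2k+1 (odd, positive)
      have hNk : N = 2*(k:Int)+1 := by omega
      have hmod : PySem.Int.mod N 2 = 1 := by
        rw [PySem.Int.mod_eq_emod_of_pos (by norm_num)]; omega
      have hmid : PySem.Int.floordiv (N-1) 2 = (k:Int) := by
        rw [PySem.Int.floordiv_eq_ediv_of_pos (by norm_num)]; omega
      rw [hNk] at hmod hmid ⊢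
      rw [solution_pos_odd k]
      simp only [solution_alt, hmod, hmid]
      rw [if_pos (by decide : (((1:Int) == 1) = true))]
      rw [pyRange_map]
      have ht : (2*(k:Int)+1).toNat = 2*k+1 := by omega
      rw [ht, range_split_odd k (fun j : Nat => (j:Int) - (k:Int))]
      congr 1
      · congr 1
        · apply List.map_congr_left
          intro j hj
          ring
        · norm_num
      · apply List.map_congr_left
        intro j hj
        push_cast
        ring

-- ===== VERDICT (by name: the statement is the Claim_ definition above) =====
theorem solution_spec : Claim_equal_solution := by
  intro N _
  unfold Spec_solution
  exact solution_spec' N
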